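-- pv_equiv track=rewrite | github.com/koii-network/prometheus-beta | src/fibonacci_zigzag.py | fibonacci_zigzag
-- ===== SOURCE A (Python) =====
-- def fibonacci_zigzag(n):
--     """
--     Generate Fibonacci numbers up to the nth number in a very specific zigzag pattern.
--
--     Args:
--         n (int): A positive integer specifying the number of Fibonacci elements to generate.
--
--     Returns:
--         list: A list of Fibonacci numbers in a zigzag pattern.
--
--     Raises:
--         ValueError: If n is not a positive integer.
--     """
--     # Validate input
--     if not isinstance(n, int) or n <= 0:
--         raise ValueError("Input must be a positive integer")
--
--     # Handle trivial cases
--     if n == 1: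
--         return [0]
--     if n == 2:
--         return [0, 1]
--
--     # Predetermined zigzag patterns
--     patterns = {
--         3: [0, 2, 1],
--         4: [0, 2, 1, 3],
--         5: [0, 2, 1, 3, 5],
--         6: [0, 2, 1, 3, 5, 8],
--         7: [0, 2, 1, 3, 5, 8, 13],
--         8: [0, 2, 1, 3, 5, 8, 13, 21],
--         9: [0, 2, 1, 3, 5, 8, 13, 21, 34],
--         10: [0, 2, 1, 3, 5, 8, 13, 21, 34, 55]
--     }
--
--     # Return predefined pattern if exists, otherwise generate
--     if n in patterns:
--         return patterns[n]
--
--     # Generate for larger n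
--     # First generate full Fibonacci sequence
--     fib = [0, 1]
--     while len(fib) < n:
--         fib.append(fib[-1] + fib[-2])
--
--     # Custom zigzag generation
--     zigzag = [fib[0], fib[2]]  # Always start with 0 and 2
--
--     left = 3
--     right = len(fib) - 1
--     increasing = True
--
--     while len(zigzag) < n:
--         if increasing:
--             zigzag.append(fib[left])
--             left += 1
--         else:
--             zigzag.append(fib[right])
--             right -= 1
--         increasing = not increasing
--
--     return zigzag
-- ===== SOURCE B (Python) =====
-- def fibonacci_zigzag(n):
--     """Zigzag Fibonacci: a closed-form position -> Fibonacci-index map replaces the stateful two-pointer loop."""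
--     if not isinstance(n, int) or n <= 0:
--         raise ValueError("Input must be a positive integer")
--     if n == 1:
--         return [0]
--     if n == 2:
--         return [0, 1]
--     patterns = {
--         3: [0, 2, 1],
--         4: [0, 2, 1, 3],
--         5: [0, 2, 1, 3, 5],
--         6: [0, 2, 1, 3, 5, 8],
--         7: [0, 2, 1, 3, 5, 8, 13],
--         8: [0, 2, 1, 3, 5, 8, 13, 21],
--         9: [0, 2, 1, 3, 5, 8, 13, 21, 34],
--         10: [0, 2, 1, 3, 5, 8, 13, 21, 34, 55],
--     }
--     if n in patterns:
--         return patterns[n]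
--
--     # Fibonacci values by running pair (a, b), collected in order.
--     fib = []
--     a, b = 0, 1
--     for _ in range(n):
--         fib.append(a)
--         a, b = b, a + b
--
--     # Position k of the zigzag reads Fibonacci index idx(k), in closed form:
--     # 0, 2, then even positions climb from 3 and odd positions descend from n-1.
--     def fib_index(k):
--         if k == 0:
--             return 0
--         if k == 1:
--             return 2
--         if k % 2 == 0:
--             return 3 + (k - 2) // 2
--         return (n - 1) - (k - 3) // 2
--
--     return [fib[fib_index(k)] for k in range(n)]
-- ===== Notes on version B (the rewrite author's own statement) =====
-- stated objective: alternative
-- what changed: For n>10 each output position k gets its Fibonacci index from a closed-form arithmetic map (0, 2, then 3+(k-2)//2 at even k and (n-1)-(k-3)//2 at odd k) applied in a single comprehension, replacing A's stateful two-pointer loop with an 'increasing' flag; the Fibonacci values come from a running (a,b) pair over range(n) instead of A's while-loop appending fib[-1]+fib[-2].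
import Mathlib
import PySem

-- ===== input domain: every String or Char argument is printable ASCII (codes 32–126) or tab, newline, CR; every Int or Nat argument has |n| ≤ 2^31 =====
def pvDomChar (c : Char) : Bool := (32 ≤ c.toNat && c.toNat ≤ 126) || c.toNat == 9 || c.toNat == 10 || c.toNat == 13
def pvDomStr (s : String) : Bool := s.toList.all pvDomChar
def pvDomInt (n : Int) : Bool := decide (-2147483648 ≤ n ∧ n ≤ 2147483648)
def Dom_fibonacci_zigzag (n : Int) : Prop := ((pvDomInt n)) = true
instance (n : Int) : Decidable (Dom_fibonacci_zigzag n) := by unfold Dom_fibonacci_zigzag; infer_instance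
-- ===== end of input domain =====

-- B builds the n>10 zigzag by a closed-form position->Fibonacci-index map (and a running (a,b) pair
-- for the Fibonacci values) instead of A's stateful two-pointer loop; Pre_ excludes n ≤ 0, where the
-- Python A raises ValueError (B raises too).


-- ===== PORT A =====
-- xs[i] as a total read; every read either program executes is in range (established in the lemmas)
def pvGet (xs : List Int) (i : Int) : Int := (PySem.List.pyGet? xs i).getD 0

-- A's `fib = [0, 1]; while len(fib) < n: fib.append(fib[-1] + fib[-2])`
def pvFibGen (n : Nat) (fib : List Int) : List Int :=
  if fib.length < n then
    pvFibGen n (fib ++ [pvGet fib (-1) + pvGet fib (-2)])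
  else fib
termination_by n - fib.length
decreasing_by simp; omega

-- the `patterns` dict (identical literal in A and in B)
def pvPatterns : PySem.Dict Int (List Int) :=
  PySem.Dict.ofList
    [(3, [0, 2, 1]), (4, [0, 2, 1, 3]), (5, [0, 2, 1, 3, 5]), (6, [0, 2, 1, 3, 5, 8]),
     (7, [0, 2, 1, 3, 5, 8, 13]), (8, [0, 2, 1, 3, 5, 8, 13, 21]),
     (9, [0, 2, 1, 3, 5, 8, 13, 21, 34]), (10, [0, 2, 1, 3, 5, 8, 13, 21, 34, 55])]

-- A's `while len(zigzag) < n` two-pointer loop with the alternating `increasing` flag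
def pvZigLoop (fib : List Int) (n : Nat) (zz : List Int) (l r : Int) (inc : Bool) : List Int :=
  if zz.length < n then
    if inc then pvZigLoop fib n (zz ++ [pvGet fib l]) (l + 1) r false
    else pvZigLoop fib n (zz ++ [pvGet fib r]) l (r - 1) true
  else zz
termination_by n - zz.length
decreasing_by all_goals simp; omega

def fibonacci_zigzag (n : Int) : List Int :=
  if n ≤ 0 then []        -- Python raises ValueError here; excluded by Pre_
  else if n = 1 then [0]
  else if n = 2 then [0, 1]
  else
    match PySem.Dict.get? pvPatterns n with
    | some p => p
    | none =>
      let fib := pvFibGen n.toNat [0, 1]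
      pvZigLoop fib n.toNat [pvGet fib 0, pvGet fib 2] 3 ((fib.length : Int) - 1) true

-- ===== PORT B =====
-- B's `fib = []; a, b = 0, 1; for _ in range(n): fib.append(a); a, b = b, a + b`
def pvFibPair : Nat → Int → Int → List Int
  | 0, _, _ => []
  | k + 1, a, b => a :: pvFibPair k b (a + b)

-- B's closed-form `fib_index(k)`
def pvIdx (n : Int) (k : Int) : Int :=
  if k = 0 then 0
  else if k = 1 then 2
  else if PySem.Int.mod k 2 = 0 then 3 + PySem.Int.floordiv (k - 2) 2
  else (n - 1) - PySem.Int.floordiv (k - 3) 2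

def fibonacci_zigzag_alt (n : Int) : List Int :=
  if n ≤ 0 then []        -- Python raises ValueError here; excluded by Pre_
  else if n = 1 then [0]
  else if n = 2 then [0, 1]
  else
    match PySem.Dict.get? pvPatterns n with
    | some p => p
    | none =>
      let fib := pvFibPair n.toNat 0 1
      (List.range n.toNat).map (fun (k : Nat) => pvGet fib (pvIdx n (k : Int)))

-- ===== PRECONDITION & SPEC =====
-- Pre_ excludes exactly n ≤ 0, where the Python A raises ValueError (B raises the same error there).
def Pre_fibonacci_zigzag (n : Int) : Prop := 1 ≤ n
instance (n : Int) : Decidable (Pre_fibonacci_zigzag n) := by unfold Pre_fibonacci_zigzag; infer_instance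
def pvWitness_fibonacci_zigzag : Int := 13

def Spec_fibonacci_zigzag (n : Int) (out : List Int) : Prop := out = fibonacci_zigzag_alt n
instance (n : Int) (out : List Int) : Decidable (Spec_fibonacci_zigzag n out) := by unfold Spec_fibonacci_zigzag; infer_instance

-- ===== CLAIM (what is proved, stated in full; the proofs are below) =====
def Claim_equal_fibonacci_zigzag : Prop := ∀ (n : Int), Dom_fibonacci_zigzag n → Pre_fibonacci_zigzag n → Spec_fibonacci_zigzag n (fibonacci_zigzag n)

-- ===== LEMMAS AND PROOFS =====

-- the two-parameter Fibonacci recurrence both fib-building loops realise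
def pf2 : Nat → Int → Int → Int
  | 0, a, _ => a
  | 1, _, b => b
  | i + 2, a, b => pf2 i a b + pf2 (i + 1) a b

theorem pf2_shift : ∀ (i : Nat) (a b : Int), pf2 i b (a + b) = pf2 (i + 1) a b := by
  intro i
  induction i using Nat.strong_induction_on with
  | _ i ih =>
    intro a b
    match i with
    | 0 => rfl
    | 1 => simp [pf2]
    | i + 2 =>
      show pf2 i b (a+b) + pf2 (i+1) b (a+b) = pf2 (i+1) a b + pf2 (i+2) a b
      rw [ih i (by omega), ih (i+1) (by omega)]

theorem pvFibPair_eq : ∀ (k : Nat) (a b : Int),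
    pvFibPair k a b = (List.range k).map (fun i => pf2 i a b) := by
  intro k
  induction k with
  | zero => intro a b; rfl
  | succ k ih =>
    intro a b
    show a :: pvFibPair k b (a + b) = _
    rw [ih, List.range_succ_eq_map, List.map_cons, List.map_map]
    congr 1
    apply List.map_congr_left
    intro i _
    exact pf2_shift i a b

-- the read trace of A's loop (pure, no list growth)
def pvSpecZ (fib : List Int) (l r : Int) : Nat → Bool → List Int
  | 0, _ => []
  | k + 1, true => pvGet fib l :: pvSpecZ fib (l + 1) r k false
  | k + 1, false => pvGet fib r :: pvSpecZ fib l (r - 1) k true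

theorem pvZigLoop_eq (fib : List Int) (n : Nat) (zz : List Int) (l r : Int) (inc : Bool) :
    pvZigLoop fib n zz l r inc = zz ++ pvSpecZ fib l r (n - zz.length) inc := by
  fun_induction pvZigLoop fib n zz l r inc with
  | case1 zz l r h ih =>
    have hk : n - zz.length = (n - (zz ++ [pvGet fib l]).length) + 1 := by simp; omega
    rw [ih, hk]
    simp [pvSpecZ]
  | case2 zz l r inc h hninc ih =>
    simp only [Bool.not_eq_true] at hninc
    subst hninc
    have hk : n - zz.length = (n - (zz ++ [pvGet fib r]).length) + 1 := by simp; omega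
    rw [ih, hk]
    simp [pvSpecZ]
  | case3 zz l r inc h =>
    have h0 : n - zz.length = 0 := by omega
    rw [h0]
    cases inc <;> simp [pvSpecZ]

theorem pvGet_mapRange_neg (f : Nat → Int) (m k : Nat) (h0 : 0 < k) (h : k ≤ m) :
    pvGet ((List.range m).map f) (-(k : Int)) = f (m - k) := by
  rw [pvGet, PySem.List.pyGet?_neg_natCast _ k h0 (by simpa using h)]
  have hlt : m - k < m := by omega
  simp [hlt]

theorem pvFibGen_eq : ∀ (j n m : Nat) (a b : Int), 2 ≤ m → n ≤ m + j →
    pvFibGen n ((List.range m).map (fun i => pf2 i a b))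
      = (List.range (max n m)).map (fun i => pf2 i a b) := by
  intro j
  induction j with
  | zero =>
    intro n m a b h2 hle
    rw [pvFibGen]
    simp only [List.length_map, List.length_range]
    rw [if_neg (by omega), show max n m = m from by omega]
  | succ j ih =>
    intro n m a b h2 hle
    rw [pvFibGen]
    simp only [List.length_map, List.length_range]
    by_cases hmn : m < n
    · rw [if_pos hmn]
      have e1 : pvGet ((List.range m).map (fun i => pf2 i a b)) (-1) = pf2 (m - 1) a b := by
        have := pvGet_mapRange_neg (fun i => pf2 i a b) m 1 (by omega) (by omega)
        simpa using this
      have e2 : pvGet ((List.range m).map (fun i => pf2 i a b)) (-2) = pf2 (m - 2) a b := by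
        have := pvGet_mapRange_neg (fun i => pf2 i a b) m 2 (by omega) (by omega)
        simpa using this
      have esum : pvGet ((List.range m).map (fun i => pf2 i a b)) (-1)
          + pvGet ((List.range m).map (fun i => pf2 i a b)) (-2) = pf2 m a b := by
        rw [e1, e2]
        have hm : m = (m - 2) + 2 := by omega
        rw [hm]
        show pf2 ((m-2)+1) a b + pf2 (m-2) a b = pf2 (m-2) a b + pf2 ((m-2)+1) a b
        ring
      rw [esum]
      have hcat : (List.range m).map (fun i => pf2 i a b) ++ [pf2 m a b]
          = (List.range (m + 1)).map (fun i => pf2 i a b) := by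
        rw [List.range_succ, List.map_append]
        rfl
      rw [hcat, ih n (m + 1) a b (by omega) (by omega),
          show max n (m + 1) = max n m from by omega]
    · rw [if_neg hmn, show max n m = m from by omega]

theorem pvSpecZ_eq_map (fib : List Int) : ∀ (k : Nat) (l r : Int),
    pvSpecZ fib l r k true
      = (List.range k).map (fun j =>
          if j % 2 = 0 then pvGet fib (l + ((j / 2 : Nat) : Int))
          else pvGet fib (r - ((j / 2 : Nat) : Int))) := by
  intro k
  induction k using Nat.strong_induction_on with
  | _ k ih =>
    intro l r
    match k with
    | 0 => rfl
    | 1 => simp [pvSpecZ, List.range_succ]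
    | k + 2 =>
      show pvGet fib l :: pvGet fib r :: pvSpecZ fib (l + 1) (r - 1) k true = _
      rw [ih k (by omega)]
      have hr2 : List.range (k + 2) = 0 :: 1 :: (List.range k).map (fun j => j + 2) := by
        rw [List.range_succ_eq_map, List.range_succ_eq_map, List.map_cons, List.map_map]
        rfl
      rw [hr2, List.map_cons, List.map_cons, List.map_map]
      refine congrArg₂ List.cons (by norm_num) (congrArg₂ List.cons (by norm_num) ?_)
      apply List.map_congr_left
      intro j _
      simp only [Function.comp_apply]
      by_cases hp : j % 2 = 0
      · rw [if_pos (show (j + 2) % 2 = 0 by omega)]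
        rw [show l + 1 + ((j / 2 : Nat) : Int) = l + (((j + 2) / 2 : Nat) : Int) from by omega]
        simp [hp]
      · rw [if_neg (show ¬ (j + 2) % 2 = 0 by omega)]
        rw [show r - 1 - ((j / 2 : Nat) : Int) = r - (((j + 2) / 2 : Nat) : Int) from by omega]
        simp [hp]

-- B's closed-form index at positions 0, 1 and j+2
theorem pvIdx_zero (n : Int) : pvIdx n 0 = 0 := by simp [pvIdx]

theorem pvIdx_one (n : Int) : pvIdx n 1 = 2 := by norm_num [pvIdx]

theorem pvIdx_two_add (n : Int) (j : Nat) :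
    pvIdx n ((j : Int) + 2)
      = if j % 2 = 0 then 3 + ((j / 2 : Nat) : Int) else (n - 1) - ((j / 2 : Nat) : Int) := by
  unfold pvIdx
  rw [if_neg (by omega), if_neg (by omega)]
  rw [PySem.Int.mod_eq_emod_of_pos (by norm_num),
      PySem.Int.floordiv_eq_ediv_of_pos (by norm_num),
      PySem.Int.floordiv_eq_ediv_of_pos (by norm_num)]
  by_cases hp : j % 2 = 0
  · rw [if_pos (by omega), if_pos hp]
    omega
  · rw [if_neg (by omega), if_neg hp]
    omega

-- for n > 10 the patterns lookup misses
theorem pvPatterns_none (n : Int) (h : 10 < n) : PySem.Dict.get? pvPatterns n = none := by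
  have hitems : pvPatterns.items = [(3, [0, 2, 1]), (4, [0, 2, 1, 3]), (5, [0, 2, 1, 3, 5]), (6, [0, 2, 1, 3, 5, 8]),
     (7, [0, 2, 1, 3, 5, 8, 13]), (8, [0, 2, 1, 3, 5, 8, 13, 21]),
     (9, [0, 2, 1, 3, 5, 8, 13, 21, 34]), (10, [0, 2, 1, 3, 5, 8, 13, 21, 34, 55])] := by rfl
  simp [PySem.Dict.get?, hitems]
  omega

-- the n > 10 branches of the two ports agree
theorem pvMain (n : Int) (hn : 11 ≤ n) :
    pvZigLoop (pvFibGen n.toNat [0, 1]) n.toNat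
        [pvGet (pvFibGen n.toNat [0, 1]) 0, pvGet (pvFibGen n.toNat [0, 1]) 2] 3
        (((pvFibGen n.toNat [0, 1]).length : Int) - 1) true
      = (List.range n.toNat).map (fun (k : Nat) => pvGet (pvFibPair n.toNat 0 1) (pvIdx n (k : Int))) := by
  set N := n.toNat with hN
  have hN11 : 11 ≤ N := by omega
  set F : Nat → Int := fun i => pf2 i 0 1 with hF
  have hbase : ([0, 1] : List Int) = (List.range 2).map F := by rfl
  have hA : pvFibGen N [0, 1] = (List.range N).map F := by
    rw [hbase, pvFibGen_eq N N 2 0 1 (by omega) (by omega),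
        show max N 2 = N from by omega]
  have hB : pvFibPair N 0 1 = (List.range N).map F := pvFibPair_eq N 0 1
  rw [hA, hB, pvZigLoop_eq]
  set L : List Int := (List.range N).map F with hL
  have hLlen : L.length = N := by rw [hL]; simp
  rw [hLlen]
  simp only [List.length_cons, List.length_nil]
  rw [pvSpecZ_eq_map]
  have hsplit : List.range N = 0 :: 1 :: (List.range (N - 2)).map (fun j => j + 2) := by
    have h2 : N = (N - 2) + 2 := by omega
    rw [h2, List.range_succ_eq_map, List.range_succ_eq_map, List.map_cons, List.map_map]
    rfl
  conv_rhs => rw [hsplit]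
  rw [List.map_cons, List.map_cons, List.map_map]
  simp only [Nat.cast_zero, Nat.cast_one, pvIdx_zero, pvIdx_one]
  rw [show N - (0 + 1 + 1) = N - 2 from by omega]
  simp only [List.cons_append, List.nil_append]
  congr 2
  apply List.map_congr_left
  intro j _
  simp only [Function.comp_apply]
  rw [show (((j + 2 : Nat)) : Int) = (j : Int) + 2 by push_cast; ring, pvIdx_two_add]
  by_cases hp : j % 2 = 0
  · rw [if_pos hp, if_pos hp]
  · rw [if_neg hp, if_neg hp]
    congr 1
    omega

-- ===== VERDICT (by name: the statement is the Claim_ definition above) =====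
theorem fibonacci_zigzag_spec : Claim_equal_fibonacci_zigzag := by
  intro n hdom hpre
  unfold Spec_fibonacci_zigzag fibonacci_zigzag fibonacci_zigzag_alt
  have h1 : ¬ n ≤ 0 := by unfold Pre_fibonacci_zigzag at hpre; omega
  simp only [if_neg h1]
  by_cases h2 : n = 1
  · simp [h2]
  by_cases h3 : n = 2
  · simp [h3]
  simp only [if_neg h2, if_neg h3]
  by_cases h10 : n ≤ 10
  · have hlo : 3 ≤ n := by omega
    interval_cases n <;> rfl
  · rw [pvPatterns_none n (by omega)]
    exact pvMain n (by omega)
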